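-- pv_equiv track=rewrite | github.com/maogongfei-dot/rentalai-backend | rental_app/routing_metadata.py | build_ordered_action_details
-- ===== SOURCE A (Python) =====
-- ACTION_DETAILS_MAP = {
--     "clarify_rule": "先明确相关规则、责任边界或租房场景中的适用条件。",
--     "explain_contract_meaning": "解释合同条款的实际含义，以及它对租客或房东的影响。",
--     "review_clause_risk": "审查该条款是否存在不公平、模糊或偏向单方的风险。",
--     "highlight_unfair_terms": "标出可能不合理或需要重点关注的合同内容。",
--     "collect_evidence": "整理聊天记录、合同、付款记录、照片等证据材料。",
--     "prepare_next_steps": "先明确争议点，再整理下一步处理顺序。",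
--     "suggest_formal_contact": "如有需要，可准备正式沟通内容，例如邮件、书面通知或投诉。",
-- }
--
-- ACTION_PRIORITY_MAP = {
--     "collect_evidence": 1,
--     "prepare_next_steps": 2,
--     "suggest_formal_contact": 3,
--     "clarify_rule": 1,
--     "explain_contract_meaning": 2,
--     "review_clause_risk": 1,
--     "highlight_unfair_terms": 2,
-- }
--
-- def get_action_priority(action_code: str) -> int:
--     """Phase1-A6-3：返回 action 的优先级数字，未知 code 返回 99。"""
--     return ACTION_PRIORITY_MAP.get(action_code, 99)
--
-- def build_ordered_action_details(recommended_actions: list) -> list: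
--     """Phase1-A6-3：按 priority 升序排列，输出适合前端展示的中文说明列表。"""
--     if not recommended_actions:
--         return []
--     # 按优先级排序，同优先级保持原顺序
--     sorted_codes = sorted(recommended_actions, key=lambda c: get_action_priority(c) if isinstance(c, str) else 99)
--     out = []
--     for code in sorted_codes:
--         s = ACTION_DETAILS_MAP.get(code) if isinstance(code, str) else None
--         if s:
--             out.append(s)
--     return out
-- ===== SOURCE B (Python) =====
-- ACTION_DETAILS_MAP = {
--     "clarify_rule": "先明确相关规则、责任边界或租房场景中的适用条件。",
--     "explain_contract_meaning": "解释合同条款的实际含义，以及它对租客或房东的影响。",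
--     "review_clause_risk": "审查该条款是否存在不公平、模糊或偏向单方的风险。",
--     "highlight_unfair_terms": "标出可能不合理或需要重点关注的合同内容。",
--     "collect_evidence": "整理聊天记录、合同、付款记录、照片等证据材料。",
--     "prepare_next_steps": "先明确争议点，再整理下一步处理顺序。",
--     "suggest_formal_contact": "如有需要，可准备正式沟通内容，例如邮件、书面通知或投诉。",
-- }
--
-- ACTION_PRIORITY_MAP = {
--     "collect_evidence": 1,
--     "prepare_next_steps": 2,
--     "suggest_formal_contact": 3,
--     "clarify_rule": 1,
--     "explain_contract_meaning": 2,
--     "review_clause_risk": 1,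
--     "highlight_unfair_terms": 2,
-- }
--
-- def get_action_priority(action_code: str) -> int:
--     return ACTION_PRIORITY_MAP.get(action_code, 99)
--
-- def build_ordered_action_details(recommended_actions: list) -> list:
--     # Single-pass bucket accumulation: the module only assigns priorities
--     # 1, 2, 3 (everything else 99), so keep one description bucket per
--     # priority level, fill them in one sweep over the input (preserving
--     # encounter order within a level), and concatenate.  No sort at all.
--     b1, b2, b3, rest = [], [], [], []
--     for code in recommended_actions:
--         s = ACTION_DETAILS_MAP.get(code) if isinstance(code, str) else None
--         if not s:
--             continue
--         p = get_action_priority(code)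
--         if p == 1:
--             b1.append(s)
--         elif p == 2:
--             b2.append(s)
--         elif p == 3:
--             b3.append(s)
--         else:
--             rest.append(s)
--     return b1 + b2 + b3 + rest
-- ===== Notes on version B (the rewrite author's own statement) =====
-- stated objective: faster
-- what changed: Replaces sort-then-filter with a single pass that distributes descriptions into one bucket per priority level (1, 2, 3, other) and concatenates the buckets, eliminating the sorted() call.
import Mathlib
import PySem

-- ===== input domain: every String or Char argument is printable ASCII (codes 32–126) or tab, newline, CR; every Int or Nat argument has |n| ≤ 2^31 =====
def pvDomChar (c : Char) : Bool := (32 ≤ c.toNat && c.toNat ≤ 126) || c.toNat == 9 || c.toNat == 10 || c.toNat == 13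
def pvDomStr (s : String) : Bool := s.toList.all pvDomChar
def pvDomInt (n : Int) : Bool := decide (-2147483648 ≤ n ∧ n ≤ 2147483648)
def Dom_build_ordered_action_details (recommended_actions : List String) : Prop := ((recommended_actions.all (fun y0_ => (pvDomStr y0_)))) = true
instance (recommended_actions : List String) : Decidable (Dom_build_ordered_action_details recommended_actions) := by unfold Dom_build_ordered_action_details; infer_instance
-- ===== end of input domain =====

-- B replaces the stable sort by priority with a single pass distributing descriptions into one bucket per priority level (1,2,3,other), then concatenates; objective: alternative algorithm (no sort).

-- ===== PORT A =====
-- module constants (shared by both Pythons)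
def ACTION_DETAILS_MAP : PySem.Dict String String := PySem.Dict.ofList [
  ("clarify_rule", "先明确相关规则、责任边界或租房场景中的适用条件。"),
  ("explain_contract_meaning", "解释合同条款的实际含义，以及它对租客或房东的影响。"),
  ("review_clause_risk", "审查该条款是否存在不公平、模糊或偏向单方的风险。"),
  ("highlight_unfair_terms", "标出可能不合理或需要重点关注的合同内容。"),
  ("collect_evidence", "整理聊天记录、合同、付款记录、照片等证据材料。"),
  ("prepare_next_steps", "先明确争议点，再整理下一步处理顺序。"),
  ("suggest_formal_contact", "如有需要，可准备正式沟通内容，例如邮件、书面通知或投诉。")]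

def ACTION_PRIORITY_MAP : PySem.Dict String Int := PySem.Dict.ofList [
  ("collect_evidence", 1),
  ("prepare_next_steps", 2),
  ("suggest_formal_contact", 3),
  ("clarify_rule", 1),
  ("explain_contract_meaning", 2),
  ("review_clause_risk", 1),
  ("highlight_unfair_terms", 2)]

def get_action_priority (action_code : String) : Int :=
  ACTION_PRIORITY_MAP.getD action_code 99

-- Port of A.  The elements are Strings here, so Python's `isinstance(c, str)` is always
-- true and is dropped; `if s:` on an Optional[str] is "present and non-empty".
def build_ordered_action_details (recommended_actions : List String) : List String :=
  if recommended_actions = [] then []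
  else
    let sorted_codes := PySem.List.sorted recommended_actions (fun c => get_action_priority c) false
    sorted_codes.foldl (fun out code =>
      match PySem.Dict.get? ACTION_DETAILS_MAP code with
      | some s => if s ≠ "" then out ++ [s] else out
      | none => out) []

-- ===== PORT B =====
-- Port of B: one pass filling four description buckets (priority 1, 2, 3, other), then concatenate.
def pvStep (st : List String × List String × List String × List String) (code : String) :
    List String × List String × List String × List String :=
  match PySem.Dict.get? ACTION_DETAILS_MAP code with
  | none => st
  | some s =>
    if s = "" then st
    else
      let p := get_action_priority code
      if p = 1 then (st.1 ++ [s], st.2.1, st.2.2.1, st.2.2.2)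
      else if p = 2 then (st.1, st.2.1 ++ [s], st.2.2.1, st.2.2.2)
      else if p = 3 then (st.1, st.2.1, st.2.2.1 ++ [s], st.2.2.2)
      else (st.1, st.2.1, st.2.2.1, st.2.2.2 ++ [s])

def build_ordered_action_details_alt (recommended_actions : List String) : List String :=
  let st := recommended_actions.foldl pvStep ([], [], [], [])
  st.1 ++ st.2.1 ++ st.2.2.1 ++ st.2.2.2

-- ===== PRECONDITION & SPEC =====
def Spec_build_ordered_action_details (recommended_actions : List String) (out : List String) : Prop := out = build_ordered_action_details_alt recommended_actions
instance (recommended_actions : List String) (out : List String) : Decidable (Spec_build_ordered_action_details recommended_actions out) := by unfold Spec_build_ordered_action_details; infer_instance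

-- ===== CLAIM (what is proved, stated in full; the proofs are below) =====
def Claim_equal_build_ordered_action_details : Prop := ∀ (recommended_actions : List String), Dom_build_ordered_action_details recommended_actions → Spec_build_ordered_action_details recommended_actions (build_ordered_action_details recommended_actions)

-- ===== LEMMAS AND PROOFS =====

-- the emit step of A's output loop ("append the description if present and non-empty")
def pvEmit (out : List String) (code : String) : List String :=
  match PySem.Dict.get? ACTION_DETAILS_MAP code with
  | some s => if s ≠ "" then out ++ [s] else out
  | none => out

-- the description A/B keep for a code, if any
def pvDesc? (code : String) : Option String :=
  match PySem.Dict.get? ACTION_DETAILS_MAP code with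
  | some s => if s = "" then none else some s
  | none => none

def pvFilt (p : Int) (xs : List String) : List String :=
  xs.filter (fun c => decide (get_action_priority c = p))

theorem prio_cases (c : String) :
    get_action_priority c = 1 ∨ get_action_priority c = 2 ∨
    get_action_priority c = 3 ∨ get_action_priority c = 99 := by
  unfold get_action_priority PySem.Dict.getD
  cases h : PySem.Dict.get? ACTION_PRIORITY_MAP c with
  | none => simp
  | some v =>
    simp only [Option.getD_some]
    unfold PySem.Dict.get? at h
    rcases Option.map_eq_some_iff.mp h with ⟨p, hfind, hv⟩
    have hp := List.mem_of_find?_eq_some hfind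
    have hitems : ACTION_PRIORITY_MAP.items =
        [("collect_evidence", (1 : Int)), ("prepare_next_steps", 2), ("suggest_formal_contact", 3),
         ("clarify_rule", 1), ("explain_contract_meaning", 2), ("review_clause_risk", 1),
         ("highlight_unfair_terms", 2)] := by decide
    rw [hitems] at hp
    fin_cases hp <;> simp_all

theorem insertBy_front {α : Type} (b : α → α → Bool) (x : α) (ys : List α)
    (h : ∀ y ∈ ys, b x y = true) : PySem.List.insertBy b x ys = x :: ys := by
  cases ys with
  | nil => rfl
  | cons y ys => simp [PySem.List.insertBy, h y (by simp)]

theorem insertBy_append_left {α : Type} (b : α → α → Bool) (x : α) (A B : List α)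
    (h : ∀ y ∈ A, b x y = false) :
    PySem.List.insertBy b x (A ++ B) = A ++ PySem.List.insertBy b x B := by
  induction A with
  | nil => rfl
  | cons a A ih =>
      simp only [List.cons_append, PySem.List.insertBy, h a (by simp)]
      simp only [Bool.false_eq_true, if_false]
      rw [ih (fun y hy => h y (by simp [hy]))]

theorem mem_pvFilt {p : Int} {xs : List String} {y : String} (h : y ∈ pvFilt p xs) :
    get_action_priority y = p := by
  simp [pvFilt, List.mem_filter] at h; exact h.2

theorem sorted_eq_buckets (xs : List String) :
    PySem.List.sorted xs (fun c => get_action_priority c) false =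
      pvFilt 1 xs ++ pvFilt 2 xs ++ pvFilt 3 xs ++ pvFilt 99 xs := by
  rw [PySem.List.sorted_eq_foldl_insertBy]
  induction xs using List.reverseRecOn with
  | nil => rfl
  | append_singleton xs x ih =>
    rw [List.foldl_append, List.foldl_cons, List.foldl_nil, ih]
    have hf : ∀ p : Int, pvFilt p (xs ++ [x]) =
        pvFilt p xs ++ (if get_action_priority x = p then [x] else []) := by
      intro p; simp only [pvFilt, List.filter_append, List.filter_cons, List.filter_nil]
      split <;> simp_all
    have hge : ∀ (p : Int), p ≤ get_action_priority x →
        (∀ y ∈ pvFilt p xs, (decide (get_action_priority x < get_action_priority y)) = false) := by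
      intro p hxp y hy; rw [mem_pvFilt hy]; simpa using hxp
    simp only [List.append_assoc]
    rcases prio_cases x with hx | hx | hx | hx
    · rw [insertBy_append_left _ _ (pvFilt 1 xs) _ (hge 1 (by omega))]
      rw [insertBy_front _ _ _ (by
        intro y hy
        have hp : get_action_priority y = 2 ∨ get_action_priority y = 3 ∨
            get_action_priority y = 99 := by
          simp only [List.mem_append] at hy
          rcases hy with hy | hy | hy
          · exact Or.inl (mem_pvFilt hy)
          · exact Or.inr (Or.inl (mem_pvFilt hy))
          · exact Or.inr (Or.inr (mem_pvFilt hy))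
        rcases hp with h | h | h <;> rw [h] <;> rw [hx] <;> decide)]
      simp [hf, hx]
    · rw [insertBy_append_left _ _ (pvFilt 1 xs) _ (hge 1 (by omega))]
      rw [insertBy_append_left _ _ (pvFilt 2 xs) _ (hge 2 (by omega))]
      rw [insertBy_front _ _ _ (by
        intro y hy
        have hp : get_action_priority y = 3 ∨ get_action_priority y = 99 := by
          simp only [List.mem_append] at hy
          rcases hy with hy | hy
          · exact Or.inl (mem_pvFilt hy)
          · exact Or.inr (mem_pvFilt hy)
        rcases hp with h | h <;> rw [h] <;> rw [hx] <;> decide)]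
      simp [hf, hx]
    · rw [insertBy_append_left _ _ (pvFilt 1 xs) _ (hge 1 (by omega))]
      rw [insertBy_append_left _ _ (pvFilt 2 xs) _ (hge 2 (by omega))]
      rw [insertBy_append_left _ _ (pvFilt 3 xs) _ (hge 3 (by omega))]
      rw [insertBy_front _ _ _ (by
        intro y hy
        rw [mem_pvFilt hy, hx]; decide)]
      simp [hf, hx]
    · rw [insertBy_append_left _ _ (pvFilt 1 xs) _ (hge 1 (by omega))]
      rw [insertBy_append_left _ _ (pvFilt 2 xs) _ (hge 2 (by omega))]
      rw [insertBy_append_left _ _ (pvFilt 3 xs) _ (hge 3 (by omega))]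
      rw [PySem.List.insertBy_of_forall_not_before _ _ _ (hge 99 (by omega))]
      simp [hf, hx]

theorem foldl_pvEmit (xs : List String) (acc : List String) :
    xs.foldl pvEmit acc = acc ++ xs.filterMap pvDesc? := by
  induction xs generalizing acc with
  | nil => simp
  | cons x xs ih =>
    simp only [List.foldl_cons, List.filterMap_cons, ih, pvEmit, pvDesc?]
    cases h : PySem.Dict.get? ACTION_DETAILS_MAP x with
    | none => simp
    | some s => by_cases hs : s = "" <;> simp [hs]

-- invariant of B's single pass: each bucket holds the descriptions of its priority class so far
theorem pvStep_fold (xs : List String) (a b c d : List String) :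
    xs.foldl pvStep (a, b, c, d) =
      (a ++ (pvFilt 1 xs).filterMap pvDesc?, b ++ (pvFilt 2 xs).filterMap pvDesc?,
       c ++ (pvFilt 3 xs).filterMap pvDesc?, d ++ (pvFilt 99 xs).filterMap pvDesc?) := by
  induction xs generalizing a b c d with
  | nil => simp [pvFilt]
  | cons x xs ih =>
    simp only [List.foldl_cons]
    have hfilt : ∀ p : Int, pvFilt p (x :: xs) =
        (if get_action_priority x = p then [x] else []) ++ pvFilt p xs := by
      intro p; simp only [pvFilt, List.filter_cons]; split <;> simp_all
    cases h : PySem.Dict.get? ACTION_DETAILS_MAP x with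
    | none =>
      have hstep : pvStep (a, b, c, d) x = (a, b, c, d) := by simp [pvStep, h]
      have hd : pvDesc? x = none := by simp [pvDesc?, h]
      rw [hstep, ih]
      rcases prio_cases x with hx | hx | hx | hx <;> simp [hfilt, hx, hd]
    | some s =>
      by_cases hs : s = ""
      · have hstep : pvStep (a, b, c, d) x = (a, b, c, d) := by simp [pvStep, h, hs]
        have hd : pvDesc? x = none := by simp [pvDesc?, h, hs]
        rw [hstep, ih]
        rcases prio_cases x with hx | hx | hx | hx <;> simp [hfilt, hx, hd]
      · have hd : pvDesc? x = some s := by simp [pvDesc?, h, hs]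
        rcases prio_cases x with hx | hx | hx | hx
        · have hstep : pvStep (a, b, c, d) x = (a ++ [s], b, c, d) := by
            simp [pvStep, h, hs, hx]
          rw [hstep, ih]; simp [hfilt, hx, hd]
        · have hstep : pvStep (a, b, c, d) x = (a, b ++ [s], c, d) := by
            simp [pvStep, h, hs, hx]
          rw [hstep, ih]; simp [hfilt, hx, hd]
        · have hstep : pvStep (a, b, c, d) x = (a, b, c ++ [s], d) := by
            simp [pvStep, h, hs, hx]
          rw [hstep, ih]; simp [hfilt, hx, hd]
        · have hstep : pvStep (a, b, c, d) x = (a, b, c, d ++ [s]) := by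
            simp [pvStep, h, hs, hx]
          rw [hstep, ih]; simp [hfilt, hx, hd]

-- ===== VERDICT (by name: the statement is the Claim_ definition above) =====
theorem build_ordered_action_details_spec : Claim_equal_build_ordered_action_details := by
  intro ra _
  unfold Spec_build_ordered_action_details
  show build_ordered_action_details ra = build_ordered_action_details_alt ra
  have halt : build_ordered_action_details_alt ra =
      (pvFilt 1 ra).filterMap pvDesc? ++ (pvFilt 2 ra).filterMap pvDesc? ++
      (pvFilt 3 ra).filterMap pvDesc? ++ (pvFilt 99 ra).filterMap pvDesc? := by
    show (let st := ra.foldl pvStep ([], [], [], []); st.1 ++ st.2.1 ++ st.2.2.1 ++ st.2.2.2) = _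
    rw [pvStep_fold]
    simp
  by_cases h : ra = []
  · subst h; simp [build_ordered_action_details, halt, pvFilt]
  · show (if ra = [] then [] else _) = _
    rw [if_neg h, halt]
    show (PySem.List.sorted ra (fun c => get_action_priority c) false).foldl pvEmit [] = _
    rw [sorted_eq_buckets]
    simp [foldl_pvEmit]
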